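-- pv_equiv track=rewrite | github.com/usaginoki/skyterra-hls-download | src/hls_downloader.py | _sort_band_files
-- ===== SOURCE A (Python) =====
-- from typing import List, Dict, Tuple, Union, Optional
--
-- def _sort_band_files(tif_files: List[str]) -> List[str]:
--     """
--     Sort band files according to standard band order: B2, B3, B4, B8A, B11, B12.
--
--     Parameters:
--     -----------
--     tif_files : List[str]
--         List of .tif filenames from Earth Engine download
--
--     Returns:
--     --------
--     List[str] : Sorted list of filenames
--     """
--     # Define the standard band order
--     band_order = ['B2', 'B3', 'B4', 'B8A', 'B11', 'B12']
--
--     def get_band_priority(filename: str) -> int: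
--         """Extract band name and return its priority order"""
--         # Extract band name from filename (e.g., "image.B2.tif" -> "B2")
--         parts = filename.split('.')
--         for part in parts:
--             if part in band_order:
--                 return band_order.index(part)
--         # If band not in standard order, put it at the end
--         return len(band_order)
--
--     return sorted(tif_files, key=get_band_priority)
-- ===== SOURCE B (Python) =====
-- from typing import List
--
-- def _sort_band_files(tif_files: List[str]) -> List[str]:
--     """Bucket sort by band priority: one pass to bucket, one pass to concatenate."""
--     band_order = ['B2', 'B3', 'B4', 'B8A', 'B11', 'B12']
--
--     def priority(filename: str) -> int:
--         for part in filename.split('.'):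
--             if part in band_order:
--                 return band_order.index(part)
--         return len(band_order)
--
--     buckets = [[] for _ in range(len(band_order) + 1)]
--     for f in tif_files:
--         buckets[priority(f)].append(f)
--     result = []
--     for bucket in buckets:
--         result.extend(bucket)
--     return result
-- ===== Notes on version B (the rewrite author's own statement) =====
-- stated objective: alternative
-- what changed: Replaces the comparison sort (sorted with a key function) by a stable bucket sort: each file's band priority is computed once, the file is appended to one of 7 buckets in a single pass over the input, and the buckets are concatenated in order.
import Mathlib
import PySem

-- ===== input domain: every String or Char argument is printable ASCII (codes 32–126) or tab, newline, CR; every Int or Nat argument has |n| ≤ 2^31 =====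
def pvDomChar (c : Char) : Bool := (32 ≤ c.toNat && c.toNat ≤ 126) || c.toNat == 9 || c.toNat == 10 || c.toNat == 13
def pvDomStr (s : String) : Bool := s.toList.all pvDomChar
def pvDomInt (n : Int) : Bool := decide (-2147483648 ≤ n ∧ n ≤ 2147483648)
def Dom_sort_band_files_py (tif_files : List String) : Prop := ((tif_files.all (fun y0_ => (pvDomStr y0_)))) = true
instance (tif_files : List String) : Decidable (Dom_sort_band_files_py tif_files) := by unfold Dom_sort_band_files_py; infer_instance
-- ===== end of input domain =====

-- B replaces A's comparison sort by a stable one-pass bucket sort over the 7 priorities (same return value).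

-- ===== PORT A =====
-- band_order = ['B2', 'B3', 'B4', 'B8A', 'B11', 'B12']
def pvBandOrder : List String := ["B2", "B3", "B4", "B8A", "B11", "B12"]

-- get_band_priority's loop: for part in parts: if part in band_order: return band_order.index(part); return len(band_order)
def pvGetBandPriorityLoop : List String → Int
  | [] => (pvBandOrder.length : Int)
  | part :: rest =>
    if part ∈ pvBandOrder then (((PySem.List.index? pvBandOrder part).getD 0 : Nat) : Int)
    else pvGetBandPriorityLoop rest

def pvGetBandPriority (filename : String) : Int :=
  pvGetBandPriorityLoop ((PySem.Str.split? filename ".").getD [])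

def sort_band_files_py (tif_files : List String) : List String :=
  PySem.List.sorted tif_files pvGetBandPriority false

-- ===== PORT B =====
def pvAltBandOrder : List String := ["B2", "B3", "B4", "B8A", "B11", "B12"]

def pvAltPriorityLoop : List String → Nat
  | [] => pvAltBandOrder.length
  | part :: rest =>
    if part ∈ pvAltBandOrder then (PySem.List.index? pvAltBandOrder part).getD 0
    else pvAltPriorityLoop rest

def pvAltPriority (filename : String) : Nat :=
  pvAltPriorityLoop ((PySem.Str.split? filename ".").getD [])

def sort_band_files_py_alt (tif_files : List String) : List String :=
  let buckets := tif_files.foldl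
    (fun bs f => bs.modify (pvAltPriority f) (fun b => b ++ [f]))
    (List.replicate (pvAltBandOrder.length + 1) [])
  buckets.foldl (fun acc b => acc ++ b) []

-- ===== PRECONDITION & SPEC =====
def Spec_sort_band_files_py (tif_files : List String) (out : List String) : Prop := out = sort_band_files_py_alt tif_files
instance (tif_files : List String) (out : List String) : Decidable (Spec_sort_band_files_py tif_files out) := by unfold Spec_sort_band_files_py; infer_instance

-- ===== CLAIM (what is proved, stated in full; the proofs are below) =====
def Claim_equal_sort_band_files_py : Prop := ∀ (tif_files : List String), Dom_sort_band_files_py tif_files → Spec_sort_band_files_py tif_files (sort_band_files_py tif_files)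

-- ===== LEMMAS AND PROOFS =====

theorem pvAltPriorityLoop_lt (ps : List String) : pvAltPriorityLoop ps < 7 := by
  induction ps with
  | nil => simp [pvAltPriorityLoop, pvAltBandOrder]
  | cons p rest ih =>
    by_cases h : p ∈ pvAltBandOrder
    · simp only [pvAltPriorityLoop, if_pos h]
      simp only [pvAltBandOrder, List.mem_cons, List.not_mem_nil, or_false] at h
      rcases h with h | h | h | h | h | h <;> subst h <;> decide
    · simpa [pvAltPriorityLoop, h] using ih

theorem pvAltPriority_lt (f : String) : pvAltPriority f < 7 :=
  pvAltPriorityLoop_lt _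

theorem prio_eq (f : String) : pvGetBandPriority f = (pvAltPriority f : Int) := by
  unfold pvGetBandPriority pvAltPriority
  generalize (PySem.Str.split? f ".").getD [] = ps
  induction ps with
  | nil => simp [pvGetBandPriorityLoop, pvAltPriorityLoop, pvBandOrder, pvAltBandOrder]
  | cons p rest ih =>
    by_cases h : p ∈ pvBandOrder
    · have h' : p ∈ pvAltBandOrder := h
      simp only [pvGetBandPriorityLoop, pvAltPriorityLoop]
      rw [if_pos h, if_pos h']
      rfl
    · have h' : p ∉ pvAltBandOrder := h
      simp only [pvGetBandPriorityLoop, pvAltPriorityLoop]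
      rw [if_neg h, if_neg h']
      exact ih

-- insertBy passes through a prefix it never inserts before
theorem insertBy_append_left {α : Type} (before : α → α → Bool) (x : α) (l1 l2 : List α)
    (h : ∀ y ∈ l1, before x y = false) :
    PySem.List.insertBy before x (l1 ++ l2) = l1 ++ PySem.List.insertBy before x l2 := by
  induction l1 with
  | nil => simp
  | cons y ys ih =>
    have hy : before x y = false := h y (by simp)
    simp [PySem.List.insertBy, hy, ih (fun z hz => h z (by simp [hz]))]

theorem insertBy_front {α : Type} (before : α → α → Bool) (x : α) (l : List α)
    (h : ∀ y ∈ l, before x y = true) :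
    PySem.List.insertBy before x l = x :: l := by
  cases l with
  | nil => simp [PySem.List.insertBy]
  | cons y ys => simp [PySem.List.insertBy, h y (by simp)]

theorem insertBy_flatMap {α κ : Type} [LinearOrder κ] (key : α → κ) (x : α)
    (is : List κ) (g : κ → List α)
    (hs : is.Pairwise (· < ·)) (hmem : key x ∈ is)
    (hg : ∀ i ∈ is, ∀ y ∈ g i, key y = i) :
    PySem.List.insertBy (fun a b => decide (key a < key b)) x (is.flatMap g)
      = is.flatMap (fun i => if i = key x then g i ++ [x] else g i) := by
  induction is with
  | nil => simp at hmem
  | cons i is' ih =>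
    rw [List.pairwise_cons] at hs
    by_cases hk : key x = i
    · have hpass : ∀ y ∈ g i, (fun a b => decide (key a < key b)) x y = false := by
        intro y hy
        have := hg i (by simp) y hy
        simp [this, hk]
      have hrest : ∀ y ∈ is'.flatMap g, (fun a b => decide (key a < key b)) x y = true := by
        intro y hy
        rcases List.mem_flatMap.mp hy with ⟨j, hj, hyj⟩
        have h1 := hg j (by simp [hj]) y hyj
        have h2 := hs.1 j hj
        simpa [h1, hk] using h2
      have hnot : ∀ j ∈ is', ¬ (j = key x) :=
        fun j hj h => absurd (hs.1 j hj) (by simp [h, hk])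
      rw [List.flatMap_cons, insertBy_append_left _ _ _ _ hpass, insertBy_front _ _ _ hrest,
        List.flatMap_cons, if_pos hk.symm]
      have hsame : List.flatMap (fun i => if i = key x then g i ++ [x] else g i) is'
          = List.flatMap g is' := by
        apply List.flatMap_congr
        intro j hj
        rw [if_neg (hnot j hj)]
      rw [hsame]
      simp
    · have hmem' : key x ∈ is' := by
        rcases List.mem_cons.mp hmem with h | h
        · exact absurd h hk
        · exact h
      have hix : i < key x := hs.1 _ hmem'
      have hpass : ∀ y ∈ g i, (fun a b => decide (key a < key b)) x y = false := by
        intro y hy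
        have := hg i (by simp) y hy
        simp [this]
        exact le_of_lt hix
      rw [List.flatMap_cons, insertBy_append_left _ _ _ _ hpass,
        ih hs.2 hmem' (fun j hj y hy => hg j (by simp [hj]) y hy),
        List.flatMap_cons, if_neg (fun h => hk h.symm)]

def pvFilt (i : Nat) (xs : List String) : List String :=
  xs.filter (fun f => pvAltPriority f = i)

theorem filterA_eq_filt (xs : List String) (i : Nat) :
    xs.filter (fun f => pvGetBandPriority f = (i : Int)) = pvFilt i xs := by
  unfold pvFilt
  apply List.filter_congr
  intro f _
  simp [prio_eq f]

theorem sorted_eq_flatMap (xs : List String) :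
    PySem.List.sorted xs pvGetBandPriority false
      = ([0, 1, 2, 3, 4, 5, 6] : List Int).flatMap
          (fun i => xs.filter (fun f => pvGetBandPriority f = i)) := by
  induction xs using List.reverseRecOn with
  | nil => simp [PySem.List.sorted]
  | append_singleton xs x ih =>
    rw [PySem.List.sorted_eq_foldl_insertBy, List.foldl_append,
      ← PySem.List.sorted_eq_foldl_insertBy, ih, List.foldl_cons, List.foldl_nil]
    rw [insertBy_flatMap pvGetBandPriority x _ _ (by decide)
      (by
        have h7 := pvAltPriority_lt x
        have := prio_eq x
        interval_cases h : pvAltPriority x <;> simp_all)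
      (by
        intro i _ y hy
        exact of_decide_eq_true (List.mem_filter.mp hy).2)]
    apply List.flatMap_congr
    intro i _
    rw [List.filter_append]
    by_cases h : i = pvGetBandPriority x
    · simp [h]
    · simp [if_neg h, show ¬ (pvGetBandPriority x = i) from fun hh => h hh.symm]

theorem foldl_buckets (xs : List String) :
    ∀ b0 b1 b2 b3 b4 b5 b6 : List String,
    xs.foldl (fun bs f => bs.modify (pvAltPriority f) (fun b => b ++ [f]))
        [b0, b1, b2, b3, b4, b5, b6]
      = [b0 ++ pvFilt 0 xs, b1 ++ pvFilt 1 xs, b2 ++ pvFilt 2 xs, b3 ++ pvFilt 3 xs,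
         b4 ++ pvFilt 4 xs, b5 ++ pvFilt 5 xs, b6 ++ pvFilt 6 xs] := by
  induction xs with
  | nil => intro b0 b1 b2 b3 b4 b5 b6; simp [pvFilt]
  | cons x xs ih =>
    intro b0 b1 b2 b3 b4 b5 b6
    rw [List.foldl_cons]
    have h7 := pvAltPriority_lt x
    interval_cases h : pvAltPriority x
    · rw [show ([b0, b1, b2, b3, b4, b5, b6] : List (List String)).modify 0
          (fun b => b ++ [x]) = [b0 ++ [x], b1, b2, b3, b4, b5, b6] from rfl, ih]
      simp [pvFilt, h]
    · rw [show ([b0, b1, b2, b3, b4, b5, b6] : List (List String)).modify 1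
          (fun b => b ++ [x]) = [b0, b1 ++ [x], b2, b3, b4, b5, b6] from rfl, ih]
      simp [pvFilt, h]
    · rw [show ([b0, b1, b2, b3, b4, b5, b6] : List (List String)).modify 2
          (fun b => b ++ [x]) = [b0, b1, b2 ++ [x], b3, b4, b5, b6] from rfl, ih]
      simp [pvFilt, h]
    · rw [show ([b0, b1, b2, b3, b4, b5, b6] : List (List String)).modify 3
          (fun b => b ++ [x]) = [b0, b1, b2, b3 ++ [x], b4, b5, b6] from rfl, ih]
      simp [pvFilt, h]
    · rw [show ([b0, b1, b2, b3, b4, b5, b6] : List (List String)).modify 4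
          (fun b => b ++ [x]) = [b0, b1, b2, b3, b4 ++ [x], b5, b6] from rfl, ih]
      simp [pvFilt, h]
    · rw [show ([b0, b1, b2, b3, b4, b5, b6] : List (List String)).modify 5
          (fun b => b ++ [x]) = [b0, b1, b2, b3, b4, b5 ++ [x], b6] from rfl, ih]
      simp [pvFilt, h]
    · rw [show ([b0, b1, b2, b3, b4, b5, b6] : List (List String)).modify 6
          (fun b => b ++ [x]) = [b0, b1, b2, b3, b4, b5, b6 ++ [x]] from rfl, ih]
      simp [pvFilt, h]

theorem alt_eq_flatten (xs : List String) :
    sort_band_files_py_alt xs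
      = pvFilt 0 xs ++ pvFilt 1 xs ++ pvFilt 2 xs ++ pvFilt 3 xs
          ++ pvFilt 4 xs ++ pvFilt 5 xs ++ pvFilt 6 xs := by
  unfold sort_band_files_py_alt
  rw [show List.replicate (pvAltBandOrder.length + 1) ([] : List String)
        = [[], [], [], [], [], [], []] from rfl]
  rw [foldl_buckets]
  simp

-- ===== VERDICT (by name: the statement is the Claim_ definition above) =====
theorem sort_band_files_py_spec : Claim_equal_sort_band_files_py := by
  intro xs _
  show sort_band_files_py xs = sort_band_files_py_alt xs
  rw [alt_eq_flatten]
  unfold sort_band_files_py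
  rw [sorted_eq_flatMap]
  simp only [List.flatMap_cons, List.flatMap_nil, List.append_nil]
  rw [show ((0 : Int)) = ((0 : Nat) : Int) from rfl]
  rw [filterA_eq_filt xs 0,
    show ((1 : Int)) = ((1 : Nat) : Int) from rfl, filterA_eq_filt xs 1,
    show ((2 : Int)) = ((2 : Nat) : Int) from rfl, filterA_eq_filt xs 2,
    show ((3 : Int)) = ((3 : Nat) : Int) from rfl, filterA_eq_filt xs 3,
    show ((4 : Int)) = ((4 : Nat) : Int) from rfl, filterA_eq_filt xs 4,
    show ((5 : Int)) = ((5 : Nat) : Int) from rfl, filterA_eq_filt xs 5,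
    show ((6 : Int)) = ((6 : Nat) : Int) from rfl, filterA_eq_filt xs 6]
  simp [List.append_assoc]
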